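-- pv_equiv track=rewrite | github.com/dadadadawjb/Phishpedia | tools/analyze.py | get_commits_id_same_commit_msg
-- ===== SOURCE A (Python) =====
-- def get_commits_id_same_commit_msg(infos):
--     commits_id = []
--     for i in range(len(infos) - 1):
--         commit_id, commit_time, commit_msg = infos[i]
--         prev_commit_id, prev_commit_time, prev_commit_msg = infos[i+1]
--         if commit_msg == prev_commit_msg:
--             commits_id.append(commit_id)
--     return commits_id
-- ===== SOURCE B (Python) =====
-- from itertools import groupby
--
-- def get_commits_id_same_commit_msg(infos):
--     commits_id = []
--     for _, group in groupby(infos, key=lambda info: info[2]):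
--         run = list(group)
--         for commit_id, commit_time, commit_msg in run[:-1]:
--             commits_id.append(commit_id)
--     return commits_id
-- ===== Notes on version B (the rewrite author's own statement) =====
-- stated objective: alternative
-- what changed: Replaced index-based adjacent-pair comparison (infos[i] vs infos[i+1]) with itertools.groupby runs of equal commit messages, emitting every commit_id but the last of each run.
import Mathlib
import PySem

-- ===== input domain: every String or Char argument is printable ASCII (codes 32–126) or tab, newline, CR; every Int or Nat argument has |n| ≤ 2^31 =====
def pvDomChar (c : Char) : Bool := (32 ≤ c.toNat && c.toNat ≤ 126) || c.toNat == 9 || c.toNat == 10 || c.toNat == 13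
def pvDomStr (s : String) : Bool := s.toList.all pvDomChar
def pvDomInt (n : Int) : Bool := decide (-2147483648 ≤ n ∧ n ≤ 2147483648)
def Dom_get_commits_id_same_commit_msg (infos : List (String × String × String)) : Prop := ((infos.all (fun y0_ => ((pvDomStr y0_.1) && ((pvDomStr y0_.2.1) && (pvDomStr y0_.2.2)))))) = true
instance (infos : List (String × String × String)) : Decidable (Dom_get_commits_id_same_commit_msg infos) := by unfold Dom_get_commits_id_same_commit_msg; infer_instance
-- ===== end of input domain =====

-- B replaces the index-based adjacent-pair scan by grouping maximal runs of equal
-- commit messages and emitting all but the last id of each run (alternative decomposition).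

-- ===== PORT A =====
-- for i in range(len(infos) - 1): compare infos[i] with infos[i+1]; indices are always in range
def get_commits_id_same_commit_msg (infos : List (String × String × String)) : List String :=
  (PySem.List.pyRange 0 ((infos.length : Int) - 1) 1).foldl
    (fun commits_id i =>
      let cur := PySem.List.pyGetD infos i ("", "", "")
      let prev := PySem.List.pyGetD infos (i + 1) ("", "", "")
      if cur.2.2 = prev.2.2 then commits_id ++ [cur.1] else commits_id)
    []

-- ===== PORT B =====
-- itertools.groupby(infos, key=msg): maximal runs of consecutively-equal messages
def pvRuns (infos : List (String × String × String)) : List (List (String × String × String)) :=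
  match infos with
  | [] => []
  | a :: t =>
    match pvRuns t with
    | [] => [[a]]
    | [] :: rs => [a] :: [] :: rs
    | (b :: r) :: rs =>
      if a.2.2 = b.2.2 then (a :: b :: r) :: rs else [a] :: (b :: r) :: rs

def get_commits_id_same_commit_msg_alt (infos : List (String × String × String)) : List String :=
  (pvRuns infos).foldl (fun commits_id run => commits_id ++ run.dropLast.map (·.1)) []

-- ===== PRECONDITION & SPEC =====
def Spec_get_commits_id_same_commit_msg (infos : List (String × String × String)) (out : List String) : Prop := out = get_commits_id_same_commit_msg_alt infos
instance (infos : List (String × String × String)) (out : List String) : Decidable (Spec_get_commits_id_same_commit_msg infos out) := by unfold Spec_get_commits_id_same_commit_msg; infer_instance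

-- ===== CLAIM (what is proved, stated in full; the proofs are below) =====
def Claim_equal_get_commits_id_same_commit_msg : Prop := ∀ (infos : List (String × String × String)), Dom_get_commits_id_same_commit_msg infos → Spec_get_commits_id_same_commit_msg infos (get_commits_id_same_commit_msg infos)

-- ===== LEMMAS AND PROOFS =====

-- common recursive characterisation: adjacent pairs
def pvPairs : List (String × String × String) → List String
  | a :: b :: t => (if a.2.2 = b.2.2 then [a.1] else []) ++ pvPairs (b :: t)
  | _ => []

theorem pvRuns_cons (a : String × String × String) (t : List (String × String × String)) :
    pvRuns (a :: t) = match pvRuns t with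
      | [] => [[a]]
      | [] :: rs => [a] :: [] :: rs
      | (b :: r) :: rs => if a.2.2 = b.2.2 then (a :: b :: r) :: rs else [a] :: (b :: r) :: rs :=
  rfl

theorem pvRuns_cons_shape (a : String × String × String) (t : List (String × String × String)) :
    ∃ r rs, pvRuns (a :: t) = (a :: r) :: rs := by
  induction t generalizing a with
  | nil => exact ⟨[], [], rfl⟩
  | cons b t ih =>
    obtain ⟨r, rs, h⟩ := ih b
    rw [pvRuns_cons, h]
    by_cases hm : a.2.2 = b.2.2
    · exact ⟨b :: r, rs, by simp [hm]⟩
    · exact ⟨[], (b :: r) :: rs, by simp [hm]⟩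

theorem flatMap_pvRuns (infos : List (String × String × String)) :
    (pvRuns infos).flatMap (fun run => run.dropLast.map (·.1)) = pvPairs infos := by
  induction infos with
  | nil => rfl
  | cons a t ih =>
    cases t with
    | nil => rfl
    | cons b t =>
      obtain ⟨r, rs, h⟩ := pvRuns_cons_shape b t
      have hpv : pvPairs (a :: b :: t)
          = (if a.2.2 = b.2.2 then [a.1] else []) ++ pvPairs (b :: t) := rfl
      rw [pvRuns_cons (a := a), h]
      dsimp only
      by_cases hm : a.2.2 = b.2.2
      · rw [if_pos hm, hpv, if_pos hm, ← ih, h]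
        simp [List.dropLast_cons₂]
      · rw [if_neg hm, hpv, if_neg hm, ← ih, h]
        simp

theorem alt_eq_pairs (infos : List (String × String × String)) :
    get_commits_id_same_commit_msg_alt infos = pvPairs infos := by
  unfold get_commits_id_same_commit_msg_alt
  rw [PySem.List.foldl_append_eq_flatMap]
  simpa using flatMap_pvRuns infos

-- A's loop as map-of-filter over Nat indices equals the adjacent-pair recursion
theorem pairs_eq_map_filter_range (a b : String × String × String)
    (t : List (String × String × String)) :
    ((List.range (t.length + 1)).filter
        (fun k => decide (((a :: b :: t).getD k ("", "", "")).2.2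
          = ((a :: b :: t).getD (k + 1) ("", "", "")).2.2))).map
      (fun k => ((a :: b :: t).getD k ("", "", "")).1)
      = pvPairs (a :: b :: t) := by
  induction t generalizing a b with
  | nil =>
    by_cases hm : a.2.2 = b.2.2 <;> simp [List.range, List.range.loop, hm, pvPairs]
  | cons c t ih =>
    have hshift : ∀ k : Nat,
        ((a :: b :: c :: t).getD (k + 1) ("", "", "")) = ((b :: c :: t).getD k ("", "", "")) :=
      fun _ => rfl
    have hf : ((fun k => ((a :: b :: c :: t).getD k ("", "", "")).1) ∘ Nat.succ)
        = (fun k => ((b :: c :: t).getD k ("", "", "")).1) := by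
      funext k
      simp only [Function.comp_apply, Nat.succ_eq_add_one, hshift k]
    have hp : ((fun k => decide (((a :: b :: c :: t).getD k ("", "", "")).2.2
          = ((a :: b :: c :: t).getD (k + 1) ("", "", "")).2.2)) ∘ Nat.succ)
        = (fun k => decide (((b :: c :: t).getD k ("", "", "")).2.2
          = ((b :: c :: t).getD (k + 1) ("", "", "")).2.2)) := by
      funext k
      simp only [Function.comp_apply, Nat.succ_eq_add_one, hshift k, hshift (k + 1)]
    have hpv : pvPairs (a :: b :: c :: t)
        = (if a.2.2 = b.2.2 then [a.1] else []) ++ pvPairs (b :: c :: t) := rfl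
    rw [List.range_succ_eq_map, List.filter_cons]
    by_cases hm : a.2.2 = b.2.2
    · rw [if_pos (by simpa using hm), List.map_cons, List.filter_map, List.map_map, hf, hp,
        hpv, if_pos hm]
      simpa using ih b c
    · rw [if_neg (by simpa using hm), List.filter_map, List.map_map, hf, hp, hpv, if_neg hm]
      simpa using ih b c

theorem a_eq_pairs (infos : List (String × String × String)) :
    get_commits_id_same_commit_msg infos = pvPairs infos := by
  unfold get_commits_id_same_commit_msg
  cases infos with
  | nil => rfl
  | cons a t =>
    cases t with
    | nil => rfl
    | cons b t =>
      have hlen : ((a :: b :: t).length : Int) - 1 = ((t.length + 1 : Nat) : Int) := by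
        rw [show (a :: b :: t).length = t.length + 2 from rfl]
        push_cast
        ring
      rw [hlen, PySem.List.pyRange_zero_natCast, List.foldl_map]
      rw [show (fun (commits_id : List String) (k : Nat) =>
            let cur := PySem.List.pyGetD (a :: b :: t) (k : Int) ("", "", "")
            let prev := PySem.List.pyGetD (a :: b :: t) ((k : Int) + 1) ("", "", "")
            if cur.2.2 = prev.2.2 then commits_id ++ [cur.1] else commits_id)
          = (fun commits_id k =>
            if (fun k : Nat => decide (((a :: b :: t).getD k ("", "", "")).2.2
                = ((a :: b :: t).getD (k + 1) ("", "", "")).2.2)) k = true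
            then commits_id ++ [(fun k : Nat => ((a :: b :: t).getD k ("", "", "")).1) k]
            else commits_id) from by
        funext acc k
        have h1 : ((k : Int) + 1) = ((k + 1 : Nat) : Int) := by push_cast; ring
        simp only [h1, PySem.List.pyGetD_natCast, decide_eq_true_eq]]
      rw [PySem.List.foldl_append_if]
      simpa using pairs_eq_map_filter_range a b t

-- ===== VERDICT (by name: the statement is the Claim_ definition above) =====
theorem get_commits_id_same_commit_msg_spec : Claim_equal_get_commits_id_same_commit_msg := by
  intro infos _
  unfold Spec_get_commits_id_same_commit_msg
  rw [a_eq_pairs, alt_eq_pairs]
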